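-- pv_equiv track=rewrite | github.com/gshuflin/pants | src/python/pants/rules/core/list_roots.py | compute_glob_text
-- ===== SOURCE A (Python) =====
-- import itertools
-- from typing import Set
--
-- def compute_glob_text(path: str, langs) -> Set[str]:
--   output_paths = set()
--   path_components = path.split('*')
--   if len(path_components) == 1:
--     return [path]
--
--   repeat = len(path_components) - 1
--   lang_combinations = itertools.product(langs, repeat=repeat)
--   for combination in lang_combinations:
--     interpolated = [*[item for pair in zip(path_components, combination) for item in pair], path_components[-1]]
--     output_paths.add(''.join(interpolated))
--
--   return output_paths
-- ===== SOURCE B (Python) =====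
-- def compute_glob_text(path, langs):
--   langs = list(langs)
--   path_components = path.split('*')
--   if len(path_components) == 1:
--     return [path]
--   results = [path_components[0]]
--   for component in path_components[1:]:
--     results = list(dict.fromkeys(
--       prefix + lang + component for prefix in results for lang in langs))
--   return set(results)
-- ===== Notes on version B (the rewrite author's own statement) =====
-- stated objective: alternative
-- what changed: B folds over the star positions, extending an order-preserving deduplicated list of prefixes one component at a time and turning it into a set at the end, instead of materialising the full itertools.product of language combinations and interpolating each tuple.
import Mathlib
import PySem

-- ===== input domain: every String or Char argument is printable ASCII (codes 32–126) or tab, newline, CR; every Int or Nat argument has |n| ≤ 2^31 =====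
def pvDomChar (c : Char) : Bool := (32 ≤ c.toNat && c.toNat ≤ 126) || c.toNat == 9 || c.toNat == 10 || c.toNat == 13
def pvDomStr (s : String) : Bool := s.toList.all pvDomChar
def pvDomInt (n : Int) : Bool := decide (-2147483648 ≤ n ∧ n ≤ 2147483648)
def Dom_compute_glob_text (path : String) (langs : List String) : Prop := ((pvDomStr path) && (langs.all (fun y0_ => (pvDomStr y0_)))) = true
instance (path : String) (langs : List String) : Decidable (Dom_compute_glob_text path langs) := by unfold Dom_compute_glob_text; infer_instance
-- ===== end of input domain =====

-- B folds over the star positions, extending a set of prefix strings one component at a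
-- time, instead of materialising the full product of language combinations (alternative).


-- ===== PORT A =====
-- itertools.product(langs, repeat=n), hand-ported (not in PySem): the first coordinate
-- varies slowest, exactly like Python's product order.
def pvProduct (langs : List String) : Nat → List (List String)
  | 0 => [[]]
  | n + 1 => langs.flatMap (fun l => (pvProduct langs n).map (fun rest => l :: rest))

def compute_glob_text (path : String) (langs : List String) : List String :=
  -- path.split('*'): the separator "*" is nonempty, so split? is always `some`
  let path_components := (PySem.Str.split? path "*").getD []
  if path_components.length = 1 then [path]
  else
    let rep := path_components.length - 1
    let lang_combinations := pvProduct langs rep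
    lang_combinations.foldl
      (fun output_paths combination =>
        PySem.Set.add output_paths
          (PySem.Str.join ""
            ((path_components.zip combination).flatMap (fun pair => [pair.1, pair.2])
              ++ [PySem.List.pyGetD path_components (-1) ""])))
      PySem.Set.empty

-- ===== PORT B =====
def compute_glob_text_alt (path : String) (langs : List String) : List String :=
  let path_components := (PySem.Str.split? path "*").getD []
  if path_components.length = 1 then [path]
  else
    PySem.Set.ofList
      ((PySem.List.slice path_components (some 1) none).foldl
        (fun results component =>
          PySem.List.dedup
            (results.flatMap (fun pre => langs.map (fun lang => pre ++ lang ++ component))))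
        [PySem.List.pyGetD path_components 0 ""])

-- ===== PRECONDITION & SPEC =====
def Spec_compute_glob_text (path : String) (langs : List String) (out : List String) : Prop := out = compute_glob_text_alt path langs
instance (path : String) (langs : List String) (out : List String) : Decidable (Spec_compute_glob_text path langs out) := by unfold Spec_compute_glob_text; infer_instance

-- ===== CLAIM (what is proved, stated in full; the proofs are below) =====
def Claim_equal_compute_glob_text : Prop := ∀ (path : String) (langs : List String), Dom_compute_glob_text path langs → Spec_compute_glob_text path langs (compute_glob_text path langs)

-- ===== LEMMAS AND PROOFS =====

-- the string A builds from one combination (exactly A's join expression)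
def pvInterp (comps : List String) (combo : List String) : String :=
  PySem.Str.join ""
    ((comps.zip combo).flatMap (fun pair => [pair.1, pair.2])
      ++ [PySem.List.pyGetD comps (-1) ""])

-- all completions of the prefix string s across the remaining components, langs-major order
def pvCompl (langs : List String) : List String → String → List String
  | [], s => [s]
  | c :: cs, s => langs.flatMap (fun l => pvCompl langs cs (s ++ l ++ c))

lemma pvGo_ne_nil (sep : List Char) : ∀ (fuel : Nat) (l cur : List Char) (acc : List (List Char)),
    PySem.Chars.splitOn.go sep fuel l cur acc ≠ [] := by
  intro fuel
  induction fuel with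
  | zero => intro l cur acc; rw [PySem.Chars.splitOn.go.eq_def]; simp
  | succ n ih =>
    intro l cur acc
    rw [PySem.Chars.splitOn.go.eq_def]
    cases l with
    | nil => simp
    | cons c rest =>
      simp only []
      split
      · exact ih _ _ _
      · exact ih _ _ _

lemma pvSplit_ne_nil (path : String) : (PySem.Str.split? path "*").getD [] ≠ [] := by
  simp [PySem.Str.split?, PySem.Chars.split?, PySem.Chars.splitOn]
  exact pvGo_ne_nil _ _ _ _ _

-- ''.join concatenates adjacent pieces
lemma pvJoin_nil_cons_cons (p q : List Char) (rest : List (List Char)) :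
    PySem.Chars.join [] (p :: q :: rest) = PySem.Chars.join [] ((p ++ q) :: rest) := by
  cases rest with
  | nil => simp [PySem.Chars.join_cons_cons, PySem.Chars.join_singleton]
  | cons r rs =>
    rw [PySem.Chars.join_cons_cons, PySem.Chars.join_cons_cons, PySem.Chars.join_cons_cons]
    simp

lemma pvStrJoin_cons_cons (p q : String) (rest : List String) :
    PySem.Str.join "" (p :: q :: rest) = PySem.Str.join "" ((p ++ q) :: rest) := by
  apply String.toList_inj.mp
  simp only [PySem.Str.toList_join, List.map_cons]
  have := pvJoin_nil_cons_cons p.toList q.toList (rest.map String.toList)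
  simpa using this

lemma pvStrJoin_singleton (p : String) : PySem.Str.join "" [p] = p := by
  apply String.toList_inj.mp
  simp [PySem.Str.toList_join, PySem.Chars.join_singleton]

lemma pvLastD_cons_cons (a b : String) (t : List String) :
    PySem.List.pyGetD (a :: b :: t) (-1) "" = PySem.List.pyGetD (b :: t) (-1) "" := by
  rw [PySem.List.pyGetD_neg_one (a :: b :: t) "" (by simp),
      PySem.List.pyGetD_neg_one (b :: t) "" (by simp)]
  exact List.getLast_cons _

lemma pvInterp_collapse (s l c : String) (cs : List String) (combo : List String)
    (h : combo.length = cs.length) :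
    pvInterp (s :: c :: cs) (l :: combo) = pvInterp ((s ++ l ++ c) :: cs) combo := by
  cases combo with
  | nil =>
    have hcs : cs = [] := List.length_eq_zero_iff.mp h.symm
    subst hcs
    simp only [pvInterp, List.zip_cons_cons, List.zip_nil_right, List.flatMap_cons,
      List.flatMap_nil, List.append_nil, List.nil_append, List.cons_append]
    rw [pvLastD_cons_cons]
    rw [PySem.List.pyGetD_neg_one [c] "" (by simp), List.getLast_singleton,
        PySem.List.pyGetD_neg_one [s ++ l ++ c] "" (by simp), List.getLast_singleton]
    rw [pvStrJoin_cons_cons, pvStrJoin_cons_cons, pvStrJoin_singleton]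
  | cons l2 combo' =>
    obtain ⟨c2, cs', rfl⟩ : ∃ c2 cs', cs = c2 :: cs' := by
      cases cs with
      | nil => simp at h
      | cons c2 cs' => exact ⟨c2, cs', rfl⟩
    simp only [pvInterp, List.zip_cons_cons, List.flatMap_cons, List.cons_append,
      List.nil_append]
    rw [pvLastD_cons_cons s c (c2 :: cs'), pvLastD_cons_cons c c2 cs',
        pvLastD_cons_cons (s ++ l ++ c) c2 cs']
    rw [pvStrJoin_cons_cons s l, pvStrJoin_cons_cons (s ++ l) c]

lemma pvMem_pvProduct_length (langs : List String) :
    ∀ (n : Nat) (combo : List String), combo ∈ pvProduct langs n → combo.length = n := by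
  intro n
  induction n with
  | zero => intro combo h; simp [pvProduct] at h; simp [h]
  | succ m ih =>
    intro combo h
    simp only [pvProduct, List.mem_flatMap, List.mem_map] at h
    obtain ⟨l, _, rest, hrest, rfl⟩ := h
    simp [ih rest hrest]

lemma pvA_side (langs : List String) : ∀ (cs : List String) (s : String),
    (pvProduct langs cs.length).map (fun combo => pvInterp (s :: cs) combo)
      = pvCompl langs cs s := by
  intro cs
  induction cs with
  | nil =>
    intro s
    simp only [List.length_nil, pvProduct, List.map_cons, List.map_nil, pvCompl]
    simp only [pvInterp, List.zip_nil_right, List.flatMap_nil, List.nil_append]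
    rw [PySem.List.pyGetD_neg_one [s] "" (by simp), List.getLast_singleton, pvStrJoin_singleton]
  | cons c cs' ih =>
    intro s
    simp only [List.length_cons, pvProduct, pvCompl, List.map_flatMap]
    refine List.flatMap_congr (fun l _ => ?_)
    rw [List.map_map]
    refine (List.map_congr_left (fun combo hc => ?_)).trans (ih (s ++ l ++ c))
    exact pvInterp_collapse s l c cs' combo (pvMem_pvProduct_length langs cs'.length combo hc)

-- deduplicating a list before a flatMap does not change the deduplicated flatMap
lemma pvOfList_flatMap_ofList {α : Type} [BEq α] [LawfulBEq α] (L : List α) (f : α → List α) :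
    PySem.Set.ofList ((PySem.Set.ofList L).flatMap f) = PySem.Set.ofList (L.flatMap f) := by
  induction L using List.reverseRecOn with
  | nil => rfl
  | append_singleton L x ih =>
    rw [PySem.Set.ofList_append_singleton]
    by_cases hx : x ∈ PySem.Set.ofList L
    · rw [PySem.Set.add_of_mem hx, ih, List.flatMap_append, PySem.Set.ofList_append,
        PySem.Set.update_eq_append_filter]
      have hfil : List.filter (fun y => !(PySem.Set.ofList (L.flatMap f)).contains y)
          (PySem.Set.ofList (List.flatMap f [x])) = [] := by
        rw [List.filter_eq_nil_iff]
        intro a ha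
        have ha' : a ∈ List.flatMap f [x] := (PySem.Set.mem_ofList _ _).mp ha
        simp only [List.flatMap_cons, List.flatMap_nil, List.append_nil] at ha'
        have : a ∈ L.flatMap f :=
          List.mem_flatMap.mpr ⟨x, (PySem.Set.mem_ofList _ _).mp hx, ha'⟩
        simp [(PySem.Set.mem_ofList _ _).mpr this]
      rw [hfil, List.append_nil]
    · rw [PySem.Set.add_of_not_mem hx, List.flatMap_append, List.flatMap_append,
        PySem.Set.ofList_append, PySem.Set.ofList_append, ih]

lemma pvB_side (langs : List String) : ∀ (cs : List String) (L : List String),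
    cs.foldl
      (fun results component =>
        PySem.Set.ofList
          (results.flatMap (fun pre => langs.map (fun lang => pre ++ lang ++ component))))
      (PySem.Set.ofList L)
    = PySem.Set.ofList (L.flatMap (pvCompl langs cs)) := by
  intro cs
  induction cs with
  | nil => intro L; simp [pvCompl, List.flatMap_singleton']
  | cons c cs' ih =>
    intro L
    simp only [List.foldl_cons]
    rw [ih ((PySem.Set.ofList L).flatMap (fun pre => langs.map (fun lang => pre ++ lang ++ c)))]
    rw [List.flatMap_assoc, pvOfList_flatMap_ofList]
    congr 1
    refine List.flatMap_congr (fun s _ => ?_)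
    simp [pvCompl, List.flatMap_map]

lemma pvFoldl_add_eq_ofList_map (f : List String → String) (combos : List (List String)) :
    combos.foldl (fun out combo => PySem.Set.add out (f combo)) PySem.Set.empty
      = PySem.Set.ofList (combos.map f) := by
  rw [PySem.Set.ofList_eq_foldl, List.foldl_map]
  rfl

-- ===== VERDICT (by name: the statement is the Claim_ definition above) =====
theorem compute_glob_text_spec : Claim_equal_compute_glob_text := by
  intro path langs _
  unfold Spec_compute_glob_text compute_glob_text compute_glob_text_alt
  have hne : (PySem.Str.split? path "*").getD [] ≠ [] := pvSplit_ne_nil path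
  set comps := (PySem.Str.split? path "*").getD [] with hc
  clear_value comps
  by_cases h1 : comps.length = 1
  · simp [h1]
  · rw [if_neg h1, if_neg h1]
    obtain ⟨s, t, rfl⟩ : ∃ s t, comps = s :: t := by
      cases comps with
      | nil => exact absurd rfl hne
      | cons a b => exact ⟨a, b, rfl⟩
    have hB := pvB_side langs t [s]
    have key : PySem.Set.ofList ((pvProduct langs ((s :: t).length - 1)).map (pvInterp (s :: t)))
        = PySem.Set.ofList
            ((PySem.List.slice (s :: t) (some 1) none).foldl
              (fun results component =>
                PySem.List.dedup
                  (results.flatMap (fun pre => langs.map (fun lang => pre ++ lang ++ component))))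
              [PySem.List.pyGetD (s :: t) 0 ""]) := by
      rw [show (s :: t).length - 1 = t.length from by simp, pvA_side]
      rw [PySem.List.slice_from_one, List.tail_cons, PySem.List.pyGetD_zero_cons]
      simp only [PySem.List.dedup_eq_ofList]
      rw [show (List.foldl
            (fun results component =>
              PySem.Set.ofList
                (results.flatMap fun pre => List.map (fun lang => pre ++ lang ++ component) langs))
            [s] t : List String)
          = PySem.Set.ofList ([s].flatMap (pvCompl langs t)) from hB]
      rw [PySem.Set.ofList_ofList]
      simp
    exact (pvFoldl_add_eq_ofList_map (pvInterp (s :: t)) _).trans key
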